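-- pv_equiv track=rewrite | github.com/chrisortman/exercises | wut.py | ff
-- ===== SOURCE A (Python) =====
-- def ff(x,y):
--     a = 0
--     for i in range(x,y):
--         c = 10
--         d = 6
--         e = 8
--         if (x*y+i) % 4 == 0:
--             a += x + c
--         elif i > y:
--             a += y * d
--         elif (x - y) == 1:
--             a += x + y
--         else:
--             a += x - y
--
--         d += 1
--     return a
-- ===== SOURCE B (Python) =====
-- def ff(x, y):
--     # Closed form: over range(x,y) only two branches are reachable
--     # ((x*y+i)%4==0 adds x+10, otherwise x-y); count the multiples arithmetically.
--     if y <= x: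
--         return 0
--     r = (-x * y) % 4                 # residue i must have mod 4
--     s = x + ((r - x) % 4)            # first i >= x with i % 4 == r
--     k = (y - s + 3) // 4             # how many such i in [x, y)
--     return k * (x + 10) + (y - x - k) * (x - y)
-- ===== Notes on version B (the rewrite author's own statement) =====
-- stated objective: faster
-- what changed: Replaced the O(y-x) loop (whose i>y and x-y==1 branches are unreachable) by an O(1) closed form: count the i in [x,y) with (x*y+i)%4==0 arithmetically and multiply out the two possible per-step contributions.
import Mathlib
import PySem

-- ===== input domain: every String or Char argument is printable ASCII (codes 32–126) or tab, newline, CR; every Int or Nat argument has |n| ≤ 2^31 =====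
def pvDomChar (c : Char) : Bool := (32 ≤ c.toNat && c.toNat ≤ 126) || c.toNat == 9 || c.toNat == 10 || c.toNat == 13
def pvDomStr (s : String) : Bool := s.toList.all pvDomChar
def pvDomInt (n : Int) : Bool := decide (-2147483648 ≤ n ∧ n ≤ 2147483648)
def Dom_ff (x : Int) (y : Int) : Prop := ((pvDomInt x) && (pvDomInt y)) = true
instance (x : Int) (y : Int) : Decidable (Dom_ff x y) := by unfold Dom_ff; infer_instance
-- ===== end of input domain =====

-- B replaces A's per-element loop by an O(1) closed-form count of the i with (x*y+i)%4==0 (objective: faster).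

-- ===== PORT A =====
def ff (x : Int) (y : Int) : Int :=
  (PySem.List.pyRange x y 1).foldl (fun a i =>
    let c : Int := 10
    let d : Int := 6
    let _e : Int := 8
    if PySem.Int.mod (x * y + i) 4 = 0 then a + (x + c)
    else if i > y then a + y * d
    else if x - y = 1 then a + (x + y)
    else a + (x - y)) 0

-- ===== PORT B =====
def ff_alt (x : Int) (y : Int) : Int :=
  if y ≤ x then 0
  else
    let r := PySem.Int.mod (-(x * y)) 4
    let s := x + PySem.Int.mod (r - x) 4
    let k := PySem.Int.floordiv (y - s + 3) 4
    k * (x + 10) + (y - x - k) * (x - y)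

-- ===== PRECONDITION & SPEC =====
def Spec_ff (x : Int) (y : Int) (out : Int) : Prop := out = ff_alt x y
instance (x : Int) (y : Int) (out : Int) : Decidable (Spec_ff x y out) := by unfold Spec_ff; infer_instance

-- ===== CLAIM (what is proved, stated in full; the proofs are below) =====
def Claim_equal_ff : Prop := ∀ (x : Int) (y : Int), Dom_ff x y → Spec_ff x y (ff x y)

-- ===== LEMMAS AND PROOFS =====

-- the value A adds for index i (with m standing for x*y)
def ffStep (x y m i : Int) : Int :=
  if PySem.Int.mod (m + i) 4 = 0 then x + 10
  else if i > y then y * 6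
  else if x - y = 1 then x + y
  else x - y

-- closed-form count of i in [a, y) with (m + i) % 4 == 0
def ffCnt (m y a : Int) : Int := (y - (a + ((-m) % 4 - a) % 4) + 3) / 4

lemma foldl_add_init (l : List Int) (g : Int → Int) :
    ∀ c : Int, l.foldl (fun acc i => acc + g i) c = c + l.foldl (fun acc i => acc + g i) 0 := by
  induction l with
  | nil => intro c; simp
  | cons h t ih =>
    intro c
    simp only [List.foldl_cons]
    rw [ih (c + g h), ih (0 + g h)]
    ring

lemma ffCnt_succ (m y a : Int) (_hay : a < y) :
    ffCnt m y a = ffCnt m y (a + 1) + (if (m + a) % 4 = 0 then 1 else 0) := by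
  unfold ffCnt
  split_ifs with h <;> omega

lemma ff_key (x y m : Int) (hxy : x < y) :
    ∀ (n : Nat) (a : Int), a + n = y →
      (PySem.List.pyRange a y 1).foldl (fun acc i => acc + ffStep x y m i) 0
        = ffCnt m y a * (x + 10) + ((y - a) - ffCnt m y a) * (x - y) := by
  intro n
  induction n with
  | zero =>
    intro a ha
    have hay : a = y := by push_cast at ha; omega
    subst hay
    rw [PySem.List.pyRange_one_eq_nil le_rfl]
    have h0 : ffCnt m a a = 0 := by unfold ffCnt; omega
    simp [h0]
  | succ n ih =>
    intro a ha
    have hlt : a < y := by push_cast at ha; omega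
    rw [PySem.List.pyRange_one_cons hlt, List.foldl_cons, foldl_add_init,
        ih (a + 1) (by push_cast at ha ⊢; omega)]
    have hmod : PySem.Int.mod (m + a) 4 = (m + a) % 4 :=
      PySem.Int.mod_eq_emod_of_pos (by norm_num)
    have hstep : ffStep x y m a =
        if (m + a) % 4 = 0 then x + 10 else x - y := by
      unfold ffStep
      rw [hmod]
      have h1 : ¬ a > y := by omega
      have h2 : ¬ x - y = 1 := by omega
      split_ifs <;> rfl
    rw [hstep, ffCnt_succ m y a hlt]
    split_ifs with h <;> ring

-- ===== VERDICT =====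
theorem ff_spec : Claim_equal_ff := by
  unfold Claim_equal_ff Spec_ff
  intro x y _
  by_cases h : y ≤ x
  · rw [ff, ff_alt, if_pos h, PySem.List.pyRange_one_eq_nil h]
    rfl
  · rw [not_le] at h
    rw [ff, ff_alt, if_neg (not_le.mpr h)]
    have hF : (fun (a i : Int) =>
        let c : Int := 10
        let d : Int := 6
        let _e : Int := 8
        if PySem.Int.mod (x * y + i) 4 = 0 then a + (x + c)
        else if i > y then a + y * d
        else if x - y = 1 then a + (x + y)
        else a + (x - y)) = fun acc i => acc + ffStep x y (x * y) i := by
      funext a i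
      simp only [ffStep]
      split_ifs <;> ring
    rw [hF, ff_key x y (x * y) h (y - x).toNat x (by omega)]
    have hr : PySem.Int.mod (-(x * y)) 4 = (-(x * y)) % 4 :=
      PySem.Int.mod_eq_emod_of_pos (by norm_num)
    have hs : PySem.Int.mod ((-(x * y)) % 4 - x) 4 = ((-(x * y)) % 4 - x) % 4 :=
      PySem.Int.mod_eq_emod_of_pos (by norm_num)
    have hk : PySem.Int.floordiv (y - (x + ((-(x * y)) % 4 - x) % 4) + 3) 4
        = (y - (x + ((-(x * y)) % 4 - x) % 4) + 3) / 4 :=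
      PySem.Int.floordiv_eq_ediv_of_pos (by norm_num)
    simp only [hr, hs, hk, ffCnt]
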